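-- pv_equiv track=rewrite | github.com/YoSazo/C2A | extras/c2a_cortex_integrated.py | _classify_constraint
-- ===== SOURCE A (Python) =====
-- def _classify_constraint(constraint):
--     """Classify constraint type for metadata"""
--     constraint_lower = constraint.lower()
--     if any(word in constraint_lower for word in ['time', 'deadline', 'schedule']):
--         return 'temporal'
--     elif any(word in constraint_lower for word in ['money', 'budget', 'cost', 'resource']):
--         return 'resource'
--     elif any(word in constraint_lower for word in ['space', 'room', 'location', 'physical']):
--         return 'spatial'
--     elif any(word in constraint_lower for word in ['people', 'team', 'social', 'relationship']):
--         return 'social'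
--     elif any(word in constraint_lower for word in ['skill', 'knowledge', 'ability', 'expertise']):
--         return 'capability'
--     else:
--         return 'other'
-- ===== SOURCE B (Python) =====
-- _KEYWORD_TABLE = [
--     ('time', 0), ('deadline', 0), ('schedule', 0),
--     ('money', 1), ('budget', 1), ('cost', 1), ('resource', 1),
--     ('space', 2), ('room', 2), ('location', 2), ('physical', 2),
--     ('people', 3), ('team', 3), ('social', 3), ('relationship', 3),
--     ('skill', 4), ('knowledge', 4), ('ability', 4), ('expertise', 4),
-- ]
-- _CATEGORY_NAMES = ('temporal', 'resource', 'spatial', 'social', 'capability')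
--
--
-- def _classify_constraint(constraint):
--     """Classify constraint type for metadata"""
--     constraint_lower = constraint.lower()
--     hits = [priority for keyword, priority in _KEYWORD_TABLE
--             if keyword in constraint_lower]
--     if not hits:
--         return 'other'
--     return _CATEGORY_NAMES[min(hits)]
-- ===== Notes on version B (the rewrite author's own statement) =====
-- stated objective: alternative
-- what changed: Replaced the ordered if-elif group checks by a flat keyword-to-priority scoring pass: collect the priorities of all matching keywords from one flat table, then select the best category by taking the minimum priority; correctness rests on the table priorities being nondecreasing, so the minimum matched priority equals the first matching group.
import Mathlib
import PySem

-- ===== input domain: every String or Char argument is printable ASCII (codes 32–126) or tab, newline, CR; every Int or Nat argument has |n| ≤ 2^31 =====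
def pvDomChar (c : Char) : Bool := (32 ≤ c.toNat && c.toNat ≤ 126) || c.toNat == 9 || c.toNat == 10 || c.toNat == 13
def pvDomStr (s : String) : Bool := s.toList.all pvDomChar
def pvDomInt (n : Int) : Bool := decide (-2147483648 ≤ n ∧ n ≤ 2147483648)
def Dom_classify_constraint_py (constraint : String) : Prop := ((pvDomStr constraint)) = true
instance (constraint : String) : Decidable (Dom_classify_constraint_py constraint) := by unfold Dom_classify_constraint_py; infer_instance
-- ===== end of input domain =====

-- ===== PORT A =====
-- B replaces A's ordered if-elif group checks by a flat keyword→priority scoring pass: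
-- collect the priorities of ALL matching keywords, then pick the best (minimum); same cost.
def classify_constraint_py (constraint : String) : String :=
  let constraint_lower := PySem.Str.lower constraint
  if ["time", "deadline", "schedule"].any (fun word => PySem.Str.isIn word constraint_lower) then
    "temporal"
  else if ["money", "budget", "cost", "resource"].any (fun word => PySem.Str.isIn word constraint_lower) then
    "resource"
  else if ["space", "room", "location", "physical"].any (fun word => PySem.Str.isIn word constraint_lower) then
    "spatial"
  else if ["people", "team", "social", "relationship"].any (fun word => PySem.Str.isIn word constraint_lower) then
    "social"
  else if ["skill", "knowledge", "ability", "expertise"].any (fun word => PySem.Str.isIn word constraint_lower) then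
    "capability"
  else
    "other"

-- ===== PORT B =====
def pvKeywordTable : List (String × Int) :=
  [ ("time", 0), ("deadline", 0), ("schedule", 0),
    ("money", 1), ("budget", 1), ("cost", 1), ("resource", 1),
    ("space", 2), ("room", 2), ("location", 2), ("physical", 2),
    ("people", 3), ("team", 3), ("social", 3), ("relationship", 3),
    ("skill", 4), ("knowledge", 4), ("ability", 4), ("expertise", 4) ]

def pvCategoryNames : List String :=
  ["temporal", "resource", "spatial", "social", "capability"]

def classify_constraint_py_alt (constraint : String) : String :=
  let constraint_lower := PySem.Str.lower constraint
  let hits := (pvKeywordTable.filter (fun kp => PySem.Str.isIn kp.1 constraint_lower)).map Prod.snd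
  match PySem.List.min? hits (fun x => x) with
  | none => "other"
  | some m => PySem.List.pyGetD pvCategoryNames m "other"

-- ===== PRECONDITION & SPEC =====
def Spec_classify_constraint_py (constraint : String) (out : String) : Prop := out = classify_constraint_py_alt constraint
instance (constraint : String) (out : String) : Decidable (Spec_classify_constraint_py constraint out) := by unfold Spec_classify_constraint_py; infer_instance

-- ===== CLAIM (what is proved, stated in full; the proofs are below) =====
def Claim_equal_classify_constraint_py : Prop := ∀ (constraint : String), Dom_classify_constraint_py constraint → Spec_classify_constraint_py constraint (classify_constraint_py constraint)

-- ===== LEMMAS AND PROOFS =====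

-- common form: the category of the FIRST table entry whose keyword occurs in the string
def pvFindForm (constraint : String) : String :=
  match pvKeywordTable.find? (fun kp => PySem.Str.isIn kp.1 (PySem.Str.lower constraint)) with
  | none => "other"
  | some kp => PySem.List.pyGetD pvCategoryNames kp.2 "other"

lemma pv_foldl_min_self (x : Int) (t : List Int) (h : ∀ y ∈ t, x ≤ y) : t.foldl min x = x := by
  induction t with
  | nil => rfl
  | cons y t ih =>
      simp only [List.foldl_cons]
      rw [min_eq_left (h y (by simp))]
      exact ih (fun z hz => h z (by simp [hz]))

lemma pv_table_sorted : pvKeywordTable.Pairwise (fun a b => a.2 ≤ b.2) := by decide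

lemma alt_eq_findForm (c : String) : classify_constraint_py_alt c = pvFindForm c := by
  have hB : classify_constraint_py_alt c =
      (match PySem.List.min?
          ((pvKeywordTable.filter (fun kp => PySem.Str.isIn kp.1 (PySem.Str.lower c))).map Prod.snd)
          (fun x => x) with
        | none => "other"
        | some m => PySem.List.pyGetD pvCategoryNames m "other") := rfl
  rw [hB]
  unfold pvFindForm
  rw [← List.head?_filter]
  set p : String × Int → Bool := fun kp => PySem.Str.isIn kp.1 (PySem.Str.lower c) with hp
  have hpw : ((pvKeywordTable.filter p).map Prod.snd).Pairwise (fun a b : Int => a ≤ b) := by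
    rw [List.pairwise_map]
    exact pv_table_sorted.sublist List.filter_sublist
  cases hms : (pvKeywordTable.filter p).map Prod.snd with
  | nil =>
      rcases List.map_eq_nil_iff.mp hms with hf
      simp [hf, PySem.List.min?]
  | cons x t =>
      rw [PySem.List.min?_id_cons]
      rcases List.map_eq_cons_iff.mp hms with ⟨kp, rest, hfe, hx, -⟩
      rw [hms] at hpw
      rw [pv_foldl_min_self x t (fun y hy => (List.pairwise_cons.mp hpw).1 y hy)]
      simp [hfe, hx]

lemma a_eq_findForm (c : String) : classify_constraint_py c = pvFindForm c := by
  unfold classify_constraint_py pvFindForm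
  simp only [pvKeywordTable, List.any_cons, List.any_nil, Bool.or_false]
  simp only [pysem]
  by_cases h1 : PySem.Chars.isIn ['t', 'i', 'm', 'e'] (PySem.Chars.lower c.toList) = true
  · simp [List.find?, h1]
    decide
  by_cases h2 : PySem.Chars.isIn ['d', 'e', 'a', 'd', 'l', 'i', 'n', 'e'] (PySem.Chars.lower c.toList) = true
  · simp [List.find?, h1, h2]
    decide
  by_cases h3 : PySem.Chars.isIn ['s', 'c', 'h', 'e', 'd', 'u', 'l', 'e'] (PySem.Chars.lower c.toList) = true
  · simp [List.find?, h1, h2, h3]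
    decide
  by_cases h4 : PySem.Chars.isIn ['m', 'o', 'n', 'e', 'y'] (PySem.Chars.lower c.toList) = true
  · simp [List.find?, h1, h2, h3, h4]
    decide
  by_cases h5 : PySem.Chars.isIn ['b', 'u', 'd', 'g', 'e', 't'] (PySem.Chars.lower c.toList) = true
  · simp [List.find?, h1, h2, h3, h4, h5]
    decide
  by_cases h6 : PySem.Chars.isIn ['c', 'o', 's', 't'] (PySem.Chars.lower c.toList) = true
  · simp [List.find?, h1, h2, h3, h4, h5, h6]
    decide
  by_cases h7 : PySem.Chars.isIn ['r', 'e', 's', 'o', 'u', 'r', 'c', 'e'] (PySem.Chars.lower c.toList) = true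
  · simp [List.find?, h1, h2, h3, h4, h5, h6, h7]
    decide
  by_cases h8 : PySem.Chars.isIn ['s', 'p', 'a', 'c', 'e'] (PySem.Chars.lower c.toList) = true
  · simp [List.find?, h1, h2, h3, h4, h5, h6, h7, h8]
    decide
  by_cases h9 : PySem.Chars.isIn ['r', 'o', 'o', 'm'] (PySem.Chars.lower c.toList) = true
  · simp [List.find?, h1, h2, h3, h4, h5, h6, h7, h8, h9]
    decide
  by_cases h10 : PySem.Chars.isIn ['l', 'o', 'c', 'a', 't', 'i', 'o', 'n'] (PySem.Chars.lower c.toList) = true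
  · simp [List.find?, h1, h2, h3, h4, h5, h6, h7, h8, h9, h10]
    decide
  by_cases h11 : PySem.Chars.isIn ['p', 'h', 'y', 's', 'i', 'c', 'a', 'l'] (PySem.Chars.lower c.toList) = true
  · simp [List.find?, h1, h2, h3, h4, h5, h6, h7, h8, h9, h10, h11]
    decide
  by_cases h12 : PySem.Chars.isIn ['p', 'e', 'o', 'p', 'l', 'e'] (PySem.Chars.lower c.toList) = true
  · simp [List.find?, h1, h2, h3, h4, h5, h6, h7, h8, h9, h10, h11, h12]
    decide
  by_cases h13 : PySem.Chars.isIn ['t', 'e', 'a', 'm'] (PySem.Chars.lower c.toList) = true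
  · simp [List.find?, h1, h2, h3, h4, h5, h6, h7, h8, h9, h10, h11, h12, h13]
    decide
  by_cases h14 : PySem.Chars.isIn ['s', 'o', 'c', 'i', 'a', 'l'] (PySem.Chars.lower c.toList) = true
  · simp [List.find?, h1, h2, h3, h4, h5, h6, h7, h8, h9, h10, h11, h12, h13, h14]
    decide
  by_cases h15 : PySem.Chars.isIn ['r', 'e', 'l', 'a', 't', 'i', 'o', 'n', 's', 'h', 'i', 'p'] (PySem.Chars.lower c.toList) = true
  · simp [List.find?, h1, h2, h3, h4, h5, h6, h7, h8, h9, h10, h11, h12, h13, h14, h15]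
    decide
  by_cases h16 : PySem.Chars.isIn ['s', 'k', 'i', 'l', 'l'] (PySem.Chars.lower c.toList) = true
  · simp [List.find?, h1, h2, h3, h4, h5, h6, h7, h8, h9, h10, h11, h12, h13, h14, h15, h16]
    decide
  by_cases h17 : PySem.Chars.isIn ['k', 'n', 'o', 'w', 'l', 'e', 'd', 'g', 'e'] (PySem.Chars.lower c.toList) = true
  · simp [List.find?, h1, h2, h3, h4, h5, h6, h7, h8, h9, h10, h11, h12, h13, h14, h15, h16, h17]
    decide
  by_cases h18 : PySem.Chars.isIn ['a', 'b', 'i', 'l', 'i', 't', 'y'] (PySem.Chars.lower c.toList) = true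
  · simp [List.find?, h1, h2, h3, h4, h5, h6, h7, h8, h9, h10, h11, h12, h13, h14, h15, h16, h17, h18]
    decide
  by_cases h19 : PySem.Chars.isIn ['e', 'x', 'p', 'e', 'r', 't', 'i', 's', 'e'] (PySem.Chars.lower c.toList) = true
  · simp [List.find?, h1, h2, h3, h4, h5, h6, h7, h8, h9, h10, h11, h12, h13, h14, h15, h16, h17, h18, h19]
    decide
  · simp [List.find?, h1, h2, h3, h4, h5, h6, h7, h8, h9, h10, h11, h12, h13, h14, h15, h16, h17, h18, h19]


-- ===== VERDICT (by name: the statement is the Claim_ definition above) =====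
theorem classify_constraint_py_spec : Claim_equal_classify_constraint_py := by
  intro constraint _
  unfold Spec_classify_constraint_py
  rw [a_eq_findForm, alt_eq_findForm]
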